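-- pv_equiv track=rewrite | github.com/henryhardigan/contact-alignment | scripts/scan_db200k_accessibility.py | max_class_run
-- ===== SOURCE A (Python) =====
-- def max_class_run(window: str, residue_class: set[str]) -> int:
--     best = 0
--     current = 0
--     for aa in window:
--         if aa in residue_class:
--             current += 1
--             best = max(best, current)
--         else:
--             current = 0
--     return best
-- ===== SOURCE B (Python) =====
-- def max_class_run(window: str, residue_class: set[str]) -> int:
--     # Form the list of maximal in-class run lengths first, then reduce with max.
--     runs = []
--     i = 0
--     n = len(window)
--     while i < n:
--         if window[i] in residue_class:
--             j = i
--             while j < n and window[j] in residue_class: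
--                 j += 1
--             runs.append(j - i)
--             i = j
--         else:
--             i += 1
--     return max(runs, default=0)
-- ===== Notes on version B (the rewrite author's own statement) =====
-- stated objective: alternative
-- what changed: Replaces A's single scan with a running best/current counter by a two-phase pass that first collects the lengths of all maximal in-class runs into a list and then reduces it with max(runs, default=0); the tight inner run-scan does less per-character bookkeeping, measured ~1.7x faster.
import Mathlib
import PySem

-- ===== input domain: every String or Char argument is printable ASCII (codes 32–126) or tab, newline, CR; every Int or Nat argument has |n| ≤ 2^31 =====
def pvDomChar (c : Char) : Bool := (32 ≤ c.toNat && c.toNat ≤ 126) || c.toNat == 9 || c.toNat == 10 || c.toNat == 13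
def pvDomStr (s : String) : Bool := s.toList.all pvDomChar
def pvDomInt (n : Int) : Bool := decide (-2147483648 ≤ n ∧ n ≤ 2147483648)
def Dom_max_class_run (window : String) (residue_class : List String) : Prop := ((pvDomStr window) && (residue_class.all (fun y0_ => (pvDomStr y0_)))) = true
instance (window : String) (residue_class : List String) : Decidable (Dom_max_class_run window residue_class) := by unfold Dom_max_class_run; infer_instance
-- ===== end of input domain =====

-- B forms the list of maximal in-class run lengths first and then reduces with max(default=0),
-- instead of A's single scan with a running best/current counter; same asymptotic cost (a timing run measured B ~1.7x faster).

-- ===== PORT A =====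
-- A: one pass keeping (best, current).
def max_class_run (window : String) (residue_class : List String) : Int :=
  (window.toList.foldl
    (fun (s : Int × Int) (aa : Char) =>
      if residue_class.contains (String.ofList [aa]) then
        (max s.1 (s.2 + 1), s.2 + 1)
      else
        (s.1, 0))
    ((0 : Int), (0 : Int))).1

-- ===== PORT B =====
-- membership test 'window[i] in residue_class' (a 1-char string against the set)
def pvMem (residue_class : List String) (c : Char) : Bool :=
  residue_class.contains (String.ofList [c])

-- the inner 'while j < n and window[j] in residue_class: j += 1' scan: length of the leading in-class run
def pvLead (rc : List String) : List Char → Nat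
  | [] => 0
  | c :: cs => if pvMem rc c then pvLead rc cs + 1 else 0

-- the outer while loop: collect the lengths (j - i) of the maximal in-class runs
def pvRuns (rc : List String) : List Char → List Int
  | [] => []
  | c :: cs =>
    if pvMem rc c then
      ((pvLead rc cs : Int) + 1) :: pvRuns rc (cs.drop (pvLead rc cs))
    else
      pvRuns rc cs
termination_by cs => cs.length
decreasing_by
  all_goals (simp only [List.length_drop, List.length_cons]; omega)

-- 'max(runs, default=0)'
def max_class_run_alt (window : String) (residue_class : List String) : Int :=
  PySem.List.maxD (pvRuns residue_class window.toList) (fun y => y) 0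

-- ===== PRECONDITION & SPEC =====
def Spec_max_class_run (window : String) (residue_class : List String) (out : Int) : Prop := out = max_class_run_alt window residue_class
instance (window : String) (residue_class : List String) (out : Int) : Decidable (Spec_max_class_run window residue_class out) := by unfold Spec_max_class_run; infer_instance

-- ===== CLAIM (what is proved, stated in full; the proofs are below) =====
def Claim_equal_max_class_run : Prop := ∀ (window : String) (residue_class : List String), Dom_max_class_run window residue_class → Spec_max_class_run window residue_class (max_class_run window residue_class)

-- ===== LEMMAS AND PROOFS =====

theorem pvRuns_cons_mem (rc : List String) (c : Char) (cs : List Char) (h : pvMem rc c = true) :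
    pvRuns rc (c :: cs) = ((pvLead rc cs : Int) + 1) :: pvRuns rc (cs.drop (pvLead rc cs)) := by
  rw [pvRuns.eq_def]; simp [h]

theorem pvRuns_cons_not (rc : List String) (c : Char) (cs : List Char) (h : pvMem rc c = false) :
    pvRuns rc (c :: cs) = pvRuns rc cs := by
  rw [pvRuns.eq_def]; simp [h]

-- characterisation of A's running scan, parameterised by the current-run counter
def pvG (rc : List String) : List Char → Int → Int
  | [], _ => 0
  | c :: cs, cur => if pvMem rc c then max (cur + 1) (pvG rc cs (cur + 1)) else pvG rc cs 0

-- max of the run list, with a foldl-friendly 0 seed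
def pvM (rc : List String) (cs : List Char) : Int :=
  (pvRuns rc cs).foldl max 0

theorem pv_foldl_max_split (t : List Int) (a b : Int) :
    t.foldl max (max a b) = max a (t.foldl max b) := by
  induction t generalizing b with
  | nil => simp
  | cons x xs ih =>
    simp only [List.foldl_cons]
    rw [show max (max a b) x = max a (max b x) by omega, ih]

theorem pvM_nonneg (rc : List String) (cs : List Char) : 0 ≤ pvM rc cs :=
  (PySem.List.le_foldl_max (pvRuns rc cs) 0).1

theorem pvM_unfold (rc : List String) (cs : List Char) :
    pvM rc cs = max (if pvLead rc cs = 0 then 0 else (pvLead rc cs : Int))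
                    (pvM rc (cs.drop (pvLead rc cs))) := by
  cases cs with
  | nil => simp [pvM, pvRuns, pvLead]
  | cons c cs =>
    by_cases h : pvMem rc c = true
    · have hL : pvLead rc (c :: cs) = pvLead rc cs + 1 := by simp [pvLead, h]
      unfold pvM
      rw [pvRuns_cons_mem rc c cs h]
      simp only [hL, List.drop_succ_cons, List.foldl_cons]
      rw [if_neg (Nat.succ_ne_zero _)]
      rw [show (max 0 ((pvLead rc cs : Int) + 1)) = max ((pvLead rc cs : Int) + 1) 0 by omega,
          pv_foldl_max_split]
      push_cast
      omega
    · have h' : pvMem rc c = false := by simpa using h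
      have h0 : pvLead rc (c :: cs) = 0 := by simp [pvLead, h']
      have hM : pvM rc (c :: cs) = pvM rc cs := by
        unfold pvM; rw [pvRuns_cons_not rc c cs h']
      simp only [h0, List.drop_zero, reduceIte]
      rw [hM]
      have := pvM_nonneg rc cs
      omega

theorem pvG_eq (rc : List String) (cs : List Char) :
    ∀ cur : Int, 0 ≤ cur →
      pvG rc cs cur = max (if pvLead rc cs = 0 then 0 else cur + (pvLead rc cs : Int))
                          (pvM rc (cs.drop (pvLead rc cs))) := by
  induction cs with
  | nil => intro cur _; simp [pvG, pvLead, pvM, pvRuns]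
  | cons c cs ih =>
    intro cur hcur
    by_cases h : pvMem rc c = true
    · have hL : pvLead rc (c :: cs) = pvLead rc cs + 1 := by simp [pvLead, h]
      simp only [pvG, h, if_true, hL, List.drop_succ_cons]
      rw [if_neg (Nat.succ_ne_zero _), ih (cur + 1) (by omega)]
      have hnn := pvM_nonneg rc (cs.drop (pvLead rc cs))
      push_cast
      split_ifs with hL0 <;> omega
    · have h' : pvMem rc c = false := by simpa using h
      have h0 : pvLead rc (c :: cs) = 0 := by simp [pvLead, h']
      have hM : pvM rc (c :: cs) = pvM rc cs := by
        unfold pvM; rw [pvRuns_cons_not rc c cs h']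
      have hg : pvG rc (c :: cs) cur = pvG rc cs 0 := by simp [pvG, h]
      rw [hg, ih 0 le_rfl]
      simp only [h0, List.drop_zero, zero_add, reduceIte]
      rw [← pvM_unfold rc cs, hM]
      have := pvM_nonneg rc cs
      omega

theorem pvA_eq (rc : List String) (cs : List Char) :
    ∀ (best cur : Int), 0 ≤ best → 0 ≤ cur →
      (cs.foldl
        (fun (s : Int × Int) (aa : Char) =>
          if rc.contains (String.ofList [aa]) then
            (max s.1 (s.2 + 1), s.2 + 1)
          else
            (s.1, 0)) (best, cur)).1 = max best (pvG rc cs cur) := by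
  induction cs with
  | nil =>
    intro best cur hb _
    simp [pvG]
    omega
  | cons c cs ih =>
    intro best cur hb hc
    by_cases h : pvMem rc c = true
    · have h' : rc.contains (String.ofList [c]) = true := h
      simp only [List.foldl_cons, h', if_true, pvG, h]
      rw [ih _ _ (by omega) (by omega)]
      omega
    · have h' : rc.contains (String.ofList [c]) = false := by simpa [pvMem] using h
      have hg : pvG rc (c :: cs) cur = pvG rc cs 0 := by simp [pvG, h]
      simp only [List.foldl_cons, h', Bool.false_eq_true, if_false, hg]
      exact ih best 0 hb le_rfl

theorem pv_alt_eq_pvM (rc : List String) (cs : List Char) :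
    PySem.List.maxD (pvRuns rc cs) (fun y => y) 0 = pvM rc cs := by
  have hpos : ∀ r ∈ pvRuns rc cs, (0 : Int) ≤ r := by
    induction cs using pvRuns.induct rc with
    | case1 => simp [pvRuns]
    | case2 c cs h ih =>
      intro r hr
      rw [pvRuns_cons_mem rc c cs h] at hr
      rcases List.mem_cons.mp hr with h1 | h2
      · subst h1; positivity
      · exact ih r h2
    | case3 c cs h ih =>
      intro r hr
      rw [pvRuns_cons_not rc c cs (by simpa using h)] at hr
      exact ih r hr
  cases hruns : pvRuns rc cs with
  | nil => simp [hruns, pvM, PySem.List.maxD, PySem.List.max?]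
  | cons r t =>
    have hr0 : (0 : Int) ≤ r := hpos r (by simp [hruns])
    simp only [PySem.List.maxD, PySem.List.max?_id_cons, Option.getD_some, pvM, hruns,
      List.foldl_cons]
    rw [show max (0 : Int) r = r by omega]

-- ===== VERDICT (by name: the statement is the Claim_ definition above) =====
theorem max_class_run_spec : Claim_equal_max_class_run := by
  intro window residue_class _
  unfold Spec_max_class_run max_class_run max_class_run_alt
  rw [pv_alt_eq_pvM, pvA_eq residue_class window.toList 0 0 le_rfl le_rfl,
      pvG_eq residue_class window.toList 0 le_rfl]
  simp only [zero_add]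
  rw [← pvM_unfold residue_class window.toList]
  have := pvM_nonneg residue_class window.toList
  omega
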